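-- pv_equiv track=rewrite | github.com/HubertKaluzny/GSAUltra201808 | 12-Across/solution.py | calc
-- ===== SOURCE A (Python) =====
-- import copy
--
-- def calc(n, x_t, r_t):
--     x = list(x_t)
--     r = list(r_t)
--
--     if n == 0:
--         return 0
--
--     explosionMatrix = [[]] * n
--
--     for i in range(0, n):
--         explosionMatrix[i] = findSecondary(n, x, r, [i])
--
--     best = 0
--     for i in range(0, n):
--         if len(explosionMatrix[i]) > len(explosionMatrix[best]):
--             best = i
--
--     newN = n
--     newX = x.copy()
--     newR = r.copy()
--
--     for exp in explosionMatrix[best]: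
--         newN -= 1
--         rElem = r[exp]
--         xElem = x[exp]
--         newR.remove(rElem)
--         newX.remove(xElem)
--
--     return 1 + calc(newN, newX, newR)
--
-- def findSecondary(n, x, r, explosions):
--     secondaryExplosions = copy.deepcopy(explosions)
--
--     for i in explosions:
--         dist = x[i]
--         power = r[i]
--         for j in range(0, n):
--             if j == i:
--                 continue
--             if j in secondaryExplosions:
--                 continue
--             if(abs(dist - x[j]) <= power):
--                 secondaryExplosions.append(j)
--     if len(secondaryExplosions) == len(explosions):
--         return secondaryExplosions
--
--     return findSecondary(n, x, r, secondaryExplosions)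
-- ===== SOURCE B (Python) =====
-- def calc(n, x_t, r_t):
--     # Iterative rounds over a live bomb count; each chain closure is computed
--     # by a worklist BFS with a boolean seen-array (every bomb processed once)
--     # instead of recursive whole-list rescans with linear membership tests;
--     # exploded bombs are removed by first-occurrence value, like the original's
--     # observable semantics.
--     x = list(x_t)
--     r = list(r_t)
--     m = n
--     rounds = 0
--     while m > 0:
--         best = None
--         best_cnt = 0
--         for i in range(m):
--             seen = [j == i for j in range(m)]
--             stack = [i]
--             while stack:
--                 k = stack.pop()
--                 for j in range(m):
--                     if not seen[j] and abs(x[k] - x[j]) <= r[k]: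
--                         seen[j] = True
--                         stack.append(j)
--             cnt = sum(seen)
--             if cnt > best_cnt:
--                 best, best_cnt = seen, cnt
--         for v in [x[j] for j in range(m) if best[j]]:
--             x.remove(v)
--         for v in [r[j] for j in range(m) if best[j]]:
--             r.remove(v)
--         m -= best_cnt
--         rounds += 1
--     return rounds
-- ===== Notes on version B (the rewrite author's own statement) =====
-- stated objective: alternative
-- what changed: Each chain closure is computed by a worklist BFS over a boolean seen-array (every bomb scanned once per closure) instead of findSecondary's recursion that rescans the whole growing explosion list with linear membership tests and deepcopies it each level, and the outer recursion becomes an iterative round loop that keeps only the best (mask, count) instead of building the full explosion matrix and rescanning it for the maximum.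
import Mathlib
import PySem

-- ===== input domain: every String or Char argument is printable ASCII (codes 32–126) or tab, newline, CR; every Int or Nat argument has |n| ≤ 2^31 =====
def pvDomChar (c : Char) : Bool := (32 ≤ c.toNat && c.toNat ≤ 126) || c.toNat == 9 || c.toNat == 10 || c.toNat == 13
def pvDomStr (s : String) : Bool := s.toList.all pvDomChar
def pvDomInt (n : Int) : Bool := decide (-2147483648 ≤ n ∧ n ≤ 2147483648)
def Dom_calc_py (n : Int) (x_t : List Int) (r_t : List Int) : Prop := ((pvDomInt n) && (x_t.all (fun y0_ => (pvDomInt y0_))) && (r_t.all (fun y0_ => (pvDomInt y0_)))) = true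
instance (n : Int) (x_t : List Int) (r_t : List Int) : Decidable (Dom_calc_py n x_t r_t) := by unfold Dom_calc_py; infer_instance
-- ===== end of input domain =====

-- B replaces A's recursive whole-list rescans (with linear membership tests) by a
-- worklist BFS over a boolean seen-array and an iterative round loop; equivalence
-- of return values is proved (neither program observably mutates its arguments).

-- ===== PORT A =====

-- list.remove(v): a ValueError (v absent) never occurs at any call site reachable under Pre_
def pyRemove (l : List Int) (v : Int) : List Int := (PySem.List.remove? l v).getD l

-- one pass of findSecondary's nested for-loops (the accumulator starts as the
-- deepcopy of `explosions`, the sources are the original `explosions`)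
def fsPass (n : Int) (x r : List Int) (explosions : List Int) : List Int :=
  explosions.foldl (fun acc i =>
    let dist := PySem.List.pyGetD x i 0
    let power := PySem.List.pyGetD r i 0
    (PySem.List.pyRange 0 n 1).foldl (fun acc2 j =>
      if j = i then acc2
      else if j ∈ acc2 then acc2
      else if |dist - PySem.List.pyGetD x j 0| ≤ power then acc2 ++ [j] else acc2) acc) explosions

-- findSecondary; the fuel only makes the Python recursion total (under Pre_ the
-- explosion list grows strictly at each recursive call, so n.toNat + 1 is never exhausted)
def fsRec (fuel : Nat) (n : Int) (x r : List Int) (explosions : List Int) : List Int :=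
  match fuel with
  | 0 => explosions
  | fuel + 1 =>
    let secondary := fsPass n x r explosions
    if secondary.length = explosions.length then secondary
    else fsRec fuel n x r secondary

-- calc; the fuel only makes the Python recursion total (under Pre_, n strictly
-- decreases each round, so n.toNat + 1 is never exhausted)
def calcA (fuel : Nat) (n : Int) (x r : List Int) : Int :=
  match fuel with
  | 0 => 0
  | fuel + 1 =>
    if n = 0 then 0
    else
      let em := (PySem.List.pyRange 0 n 1).map (fun i => fsRec (n.toNat + 1) n x r [i])
      let best := (PySem.List.pyRange 0 n 1).foldl (fun best i =>
        if (PySem.List.pyGetD em i []).length > (PySem.List.pyGetD em best []).length then i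
        else best) 0
      let st := (PySem.List.pyGetD em best []).foldl
        (fun (st : Int × List Int × List Int) exp =>
          (st.1 - 1, pyRemove st.2.1 (PySem.List.pyGetD x exp 0),
                     pyRemove st.2.2 (PySem.List.pyGetD r exp 0)))
        (n, x, r)
      1 + calcA fuel st.1 st.2.1 st.2.2

def calc_py (n : Int) (x_t : List Int) (r_t : List Int) : Int :=
  calcA (n.toNat + 1) n x_t r_t

-- ===== PORT B =====

-- inner `for j in range(m)` scan of the BFS from source k
def bScan (m : Int) (x r : List Int) (k : Int) (st : List Bool × List Int) :
    List Bool × List Int :=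
  (PySem.List.pyRange 0 m 1).foldl (fun st j =>
    if !(PySem.List.pyGetD st.1 j false)
        && |PySem.List.pyGetD x k 0 - PySem.List.pyGetD x j 0| ≤ PySem.List.pyGetD r k 0
    then (PySem.List.pySetD st.1 j true, st.2 ++ [j])
    else st) st

-- `while stack:` worklist loop; the fuel only makes it total (each index is
-- pushed at most once, so m.toNat + 1 iterations are never exhausted)
def bBFS (fuel : Nat) (m : Int) (x r : List Int) (seen : List Bool) (stack : List Int) :
    List Bool :=
  match fuel with
  | 0 => seen
  | fuel + 1 =>
    match PySem.List.pop? stack (-1) with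
    | none => seen
    | some (k, rest) =>
      let st := bScan m x r k (seen, rest)
      bBFS fuel m x r st.1 st.2

def bClosure (m : Int) (x r : List Int) (i : Int) : List Bool :=
  bBFS (m.toNat + 1) m x r ((PySem.List.pyRange 0 m 1).map (fun j => j == i)) [i]

-- the `for i in range(m)` candidate loop keeping the best (mask, count)
def bBest (m : Int) (x r : List Int) : List Bool × Int :=
  (PySem.List.pyRange 0 m 1).foldl (fun (bst : List Bool × Int) i =>
    let seen := bClosure m x r i
    let cnt : Int := (seen.count true : Nat)
    if cnt > bst.2 then (seen, cnt) else bst) ([], 0)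

-- `while m > 0:` round loop; the fuel only makes it total (m strictly decreases under Pre_)
def bLoop (fuel : Nat) (m : Int) (x r : List Int) (rounds : Int) : Int :=
  match fuel with
  | 0 => rounds
  | fuel + 1 =>
    if m > 0 then
      let bst := bBest m x r
      let idxs := (PySem.List.pyRange 0 m 1).filter (fun j => PySem.List.pyGetD bst.1 j false)
      let x' := (idxs.map (fun j => PySem.List.pyGetD x j 0)).foldl pyRemove x
      let r' := (idxs.map (fun j => PySem.List.pyGetD r j 0)).foldl pyRemove r
      bLoop fuel (m - bst.2) x' r' (rounds + 1)
    else rounds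

def calc_py_alt (n : Int) (x_t : List Int) (r_t : List Int) : Int :=
  bLoop (n.toNat + 1) n x_t r_t 0

-- ===== PRECONDITION & SPEC =====
-- Pre_ excludes exactly the inputs where A raises IndexError: n < 0, or n exceeding
-- the length of either list.
def Pre_calc_py (n : Int) (x_t : List Int) (r_t : List Int) : Prop :=
  0 ≤ n ∧ n ≤ (x_t.length : Int) ∧ n ≤ (r_t.length : Int)
instance (n : Int) (x_t : List Int) (r_t : List Int) : Decidable (Pre_calc_py n x_t r_t) := by
  unfold Pre_calc_py; infer_instance

def pvWitness_calc_py : Int × List Int × List Int := (3, [0, 5, 11], [2, 7, 1])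

def Spec_calc_py (n : Int) (x_t : List Int) (r_t : List Int) (out : Int) : Prop :=
  out = calc_py_alt n x_t r_t
instance (n : Int) (x_t : List Int) (r_t : List Int) (out : Int) :
    Decidable (Spec_calc_py n x_t r_t out) := by unfold Spec_calc_py; infer_instance

-- ===== CLAIM (what is proved, stated in full; the proofs are below) =====
def Claim_equal_calc_py : Prop := ∀ (n : Int) (x_t : List Int) (r_t : List Int),
  Dom_calc_py n x_t r_t → Pre_calc_py n x_t r_t → Spec_calc_py n x_t r_t (calc_py n x_t r_t)

-- ===== LEMMAS AND PROOFS =====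

theorem pyRemove_eq_erase (l : List Int) (v : Int) : pyRemove l v = l.erase v := by
  by_cases h : v ∈ l
  · simp [pyRemove, PySem.List.remove?_eq_some_erase l v h]
  · simp [pyRemove, (PySem.List.remove?_eq_none_iff l v).2 h, List.erase_of_not_mem h]

theorem inner_fold (x : List Int) (i dist power : Int) :
    ∀ (js acc : List Int),
      acc <+: js.foldl (fun acc2 j => if j = i then acc2 else if j ∈ acc2 then acc2
        else if |dist - PySem.List.pyGetD x j 0| ≤ power then acc2 ++ [j] else acc2) acc ∧
      (acc.Nodup → (js.foldl (fun acc2 j => if j = i then acc2 else if j ∈ acc2 then acc2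
        else if |dist - PySem.List.pyGetD x j 0| ≤ power then acc2 ++ [j] else acc2) acc).Nodup) ∧
      (∀ jj, jj ∈ js.foldl (fun acc2 j => if j = i then acc2 else if j ∈ acc2 then acc2
        else if |dist - PySem.List.pyGetD x j 0| ≤ power then acc2 ++ [j] else acc2) acc ↔
        jj ∈ acc ∨ (jj ∈ js ∧ jj ≠ i ∧ |dist - PySem.List.pyGetD x jj 0| ≤ power)) := by
  intro js
  induction js with
  | nil => intro acc; simp
  | cons j0 tl ih =>
    intro acc
    simp only [List.foldl_cons]
    by_cases h1 : j0 = i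
    · simp only [if_pos h1]
      refine ⟨(ih acc).1, (ih acc).2.1, fun jj => ?_⟩
      rw [(ih acc).2.2 jj]
      simp only [List.mem_cons]
      by_cases hj : jj = j0
      · subst hj; tauto
      · tauto
    · simp only [if_neg h1]
      by_cases h2 : j0 ∈ acc
      · simp only [if_pos h2]
        refine ⟨(ih acc).1, (ih acc).2.1, fun jj => ?_⟩
        rw [(ih acc).2.2 jj]
        simp only [List.mem_cons]
        by_cases hj : jj = j0
        · subst hj; tauto
        · tauto
      · simp only [if_neg h2]
        by_cases h3 : |dist - PySem.List.pyGetD x j0 0| ≤ power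
        · simp only [if_pos h3]
          refine ⟨?_, ?_, fun jj => ?_⟩
          · exact (List.prefix_append acc [j0]).trans (ih (acc ++ [j0])).1
          · intro hnd
            refine (ih (acc ++ [j0])).2.1 ?_
            refine List.Nodup.append hnd (List.nodup_singleton j0) ?_
            simp only [List.disjoint_singleton]
            exact h2
          · rw [(ih (acc ++ [j0])).2.2 jj]
            simp only [List.mem_cons, List.mem_append]
            by_cases hj : jj = j0
            · subst hj; tauto
            · tauto
        · simp only [if_neg h3]
          refine ⟨(ih acc).1, (ih acc).2.1, fun jj => ?_⟩
          rw [(ih acc).2.2 jj]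
          simp only [List.mem_cons]
          by_cases hj : jj = j0
          · subst hj; tauto
          · tauto

def ed (n : Int) (x r : List Int) (k j : Int) : Prop :=
  0 ≤ j ∧ j < n ∧ j ≠ k ∧
    |PySem.List.pyGetD x k 0 - PySem.List.pyGetD x j 0| ≤ PySem.List.pyGetD r k 0

def Reach (n : Int) (x r : List Int) (i j : Int) : Prop :=
  Relation.ReflTransGen (ed n x r) i j

theorem pass_fold (n : Int) (x r : List Int) :
    ∀ (srcs acc : List Int),
      acc <+: srcs.foldl (fun acc i =>
        let dist := PySem.List.pyGetD x i 0
        let power := PySem.List.pyGetD r i 0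
        (PySem.List.pyRange 0 n 1).foldl (fun acc2 j =>
          if j = i then acc2
          else if j ∈ acc2 then acc2
          else if |dist - PySem.List.pyGetD x j 0| ≤ power then acc2 ++ [j] else acc2) acc) acc ∧
      (acc.Nodup → (srcs.foldl (fun acc i =>
        let dist := PySem.List.pyGetD x i 0
        let power := PySem.List.pyGetD r i 0
        (PySem.List.pyRange 0 n 1).foldl (fun acc2 j =>
          if j = i then acc2
          else if j ∈ acc2 then acc2
          else if |dist - PySem.List.pyGetD x j 0| ≤ power then acc2 ++ [j] else acc2) acc) acc).Nodup) ∧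
      (∀ jj, jj ∈ srcs.foldl (fun acc i =>
        let dist := PySem.List.pyGetD x i 0
        let power := PySem.List.pyGetD r i 0
        (PySem.List.pyRange 0 n 1).foldl (fun acc2 j =>
          if j = i then acc2
          else if j ∈ acc2 then acc2
          else if |dist - PySem.List.pyGetD x j 0| ≤ power then acc2 ++ [j] else acc2) acc) acc ↔
        jj ∈ acc ∨ ∃ k ∈ srcs, ed n x r k jj) := by
  intro srcs
  induction srcs with
  | nil => intro acc; simp
  | cons k0 tl ih =>
    intro acc
    simp only [List.foldl_cons]
    set acc1 := (PySem.List.pyRange 0 n 1).foldl (fun acc2 j =>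
      if j = k0 then acc2
      else if j ∈ acc2 then acc2
      else if |PySem.List.pyGetD x k0 0 - PySem.List.pyGetD x j 0| ≤ PySem.List.pyGetD r k0 0
        then acc2 ++ [j] else acc2) acc with hacc1
    have hinner := inner_fold x k0 (PySem.List.pyGetD x k0 0) (PySem.List.pyGetD r k0 0)
      (PySem.List.pyRange 0 n 1) acc
    refine ⟨?_, ?_, fun jj => ?_⟩
    · exact hinner.1.trans (ih acc1).1
    · intro hnd; exact (ih acc1).2.1 (hinner.2.1 hnd)
    · rw [(ih acc1).2.2 jj, hinner.2.2 jj]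
      simp only [PySem.List.mem_pyRange_one, List.mem_cons]
      constructor
      · rintro ((h | ⟨⟨h0, hn⟩, hne, hc⟩) | ⟨k, hk, hek⟩)
        · exact Or.inl h
        · exact Or.inr ⟨k0, Or.inl rfl, h0, hn, hne, hc⟩
        · exact Or.inr ⟨k, Or.inr hk, hek⟩
      · rintro (h | ⟨k, (rfl | hk), hek⟩)
        · exact Or.inl (Or.inl h)
        · exact Or.inl (Or.inr ⟨⟨hek.1, hek.2.1⟩, hek.2.2⟩)
        · exact Or.inr ⟨k, hk, hek⟩

theorem pass_fold' (n : Int) (x r : List Int) (s : List Int) :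
    s <+: fsPass n x r s ∧ (s.Nodup → (fsPass n x r s).Nodup) ∧
      (∀ jj, jj ∈ fsPass n x r s ↔ jj ∈ s ∨ ∃ k ∈ s, ed n x r k jj) :=
  pass_fold n x r s s

theorem reach_bounds (n : Int) (x r : List Int) (i j : Int)
    (hi : 0 ≤ i ∧ i < n) (h : Reach n x r i j) : 0 ≤ j ∧ j < n := by
  induction h with
  | refl => exact hi
  | tail _ he _ => exact ⟨he.1, he.2.1⟩

theorem closed_reach (n : Int) (x r : List Int) (s : List Int) (i j : Int)
    (hin : i ∈ s) (hcl : ∀ k ∈ s, ∀ j, ed n x r k j → j ∈ s)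
    (h : Reach n x r i j) : j ∈ s := by
  induction h with
  | refl => exact hin
  | tail _ he ih => exact hcl _ ih _ he

theorem fsRec_correct (n : Int) (x r : List Int) (i : Int)
    (hi : 0 ≤ i ∧ i < n) : ∀ (fuel : Nat) (s : List Int),
    s.Nodup → (∀ e ∈ s, 0 ≤ e ∧ e < n ∧ Reach n x r i e) →
    i ∈ s → n.toNat + 1 - s.length ≤ fuel →
    (fsRec fuel n x r s).Nodup ∧ (∀ j, j ∈ fsRec fuel n x r s ↔ Reach n x r i j) := by
  intro fuel
  induction fuel with
  | zero =>
    intro s hnd hmem hin hfuel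
    exfalso
    have hsub : s ⊆ PySem.List.pyRange 0 n 1 := by
      intro e he
      rcases hmem e he with ⟨h0, hn, _⟩
      exact PySem.List.mem_pyRange_one.2 ⟨h0, hn⟩
    have hle := (hnd.subperm hsub).length_le
    rw [PySem.List.length_pyRange_one] at hle
    omega
  | succ fuel ih =>
    intro s hnd hmem hin hfuel
    have hpass := pass_fold' n x r s
    have hpre : s <+: fsPass n x r s := hpass.1
    rw [fsRec]
    by_cases hlen : (fsPass n x r s).length = s.length
    · simp only [if_pos hlen]
      have heq : s = fsPass n x r s := hpre.eq_of_length hlen.symm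
      rw [← heq]
      refine ⟨hnd, fun j => ⟨fun hj => (hmem j hj).2.2, fun hr => ?_⟩⟩
      refine closed_reach n x r s i j hin (fun k hk j' he => ?_) hr
      have : j' ∈ fsPass n x r s := (hpass.2.2 j').2 (Or.inr ⟨k, hk, he⟩)
      rwa [← heq] at this
    · simp only [if_neg hlen]
      have hlt : s.length < (fsPass n x r s).length :=
        lt_of_le_of_ne hpre.length_le (fun h => hlen h.symm)
      refine ih (fsPass n x r s) (hpass.2.1 hnd) ?_ ?_ ?_
      · intro e he
        rcases (hpass.2.2 e).1 he with he' | ⟨k, hk, hek⟩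
        · exact hmem e he'
        · rcases hmem k hk with ⟨_, _, hrk⟩
          exact ⟨hek.1, hek.2.1, hrk.tail hek⟩
      · exact (hpass.2.2 i).2 (Or.inl hin)
      · omega

def sg (s : List Bool) (j : Int) : Bool := PySem.List.pyGetD s j false

theorem count_set_true (s : List Bool) (jn : Nat) (h : jn < s.length)
    (hf : s[jn] = false) : (s.set jn true).count true = s.count true + 1 := by
  rw [List.set_eq_take_append_cons_drop, if_pos h]
  conv_rhs => rw [← List.take_append_drop jn s, ← List.getElem_cons_drop h]
  rw [hf]
  simp only [List.count_append, List.count_cons]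
  simp
  omega

theorem sg_nonneg (s : List Bool) (j : Int) (hj : 0 ≤ j) :
    sg s j = s.getD j.toNat false := by
  rw [sg, PySem.List.pyGetD_of_nonneg _ _ hj]

theorem sg_pySetD (s : List Bool) (j0 : Int) (h0 : 0 ≤ j0) (h1 : j0 < (s.length : Int))
    (j : Int) (hj : 0 ≤ j) :
    sg (PySem.List.pySetD s j0 true) j = if j = j0 then true else sg s j := by
  have hlt : j0.toNat < s.length := by omega
  have hset : PySem.List.pySetD s j0 true = s.set j0.toNat true := by
    conv_lhs => rw [(Int.toNat_of_nonneg h0).symm]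
    exact PySem.List.pySetD_natCast s j0.toNat true
  rw [hset, sg_nonneg _ _ hj, sg_nonneg _ _ hj]
  rw [List.getD, List.getD, List.getElem?_set]
  by_cases he : j = j0
  · subst he
    simp [if_pos rfl, hlt]
  · have hne : j0.toNat ≠ j.toNat := by omega
    simp [hne, he]

theorem count_sg_set (s : List Bool) (j0 : Int) (h0 : 0 ≤ j0) (h1 : j0 < (s.length : Int))
    (hb : sg s j0 = false) :
    (PySem.List.pySetD s j0 true).count true = s.count true + 1 := by
  have hlt : j0.toNat < s.length := by omega
  have hset : PySem.List.pySetD s j0 true = s.set j0.toNat true := by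
    conv_lhs => rw [(Int.toNat_of_nonneg h0).symm]
    exact PySem.List.pySetD_natCast s j0.toNat true
  rw [hset]
  refine count_set_true s j0.toNat hlt ?_
  rw [sg_nonneg _ _ h0] at hb
  rwa [List.getD, List.getElem?_eq_getElem hlt, Option.getD_some] at hb

def scanStep (x r : List Int) (k : Int) : List Bool × List Int → Int → List Bool × List Int :=
  fun st j =>
    if !(PySem.List.pyGetD st.1 j false)
        && |PySem.List.pyGetD x k 0 - PySem.List.pyGetD x j 0| ≤ PySem.List.pyGetD r k 0
    then (PySem.List.pySetD st.1 j true, st.2 ++ [j])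
    else st

theorem bScan_eq (m : Int) (x r : List Int) (k : Int) (st : List Bool × List Int) :
    bScan m x r k st = (PySem.List.pyRange 0 m 1).foldl (scanStep x r k) st := rfl

theorem bScan_fold (m : Int) (x r : List Int) (k : Int) :
    ∀ (js : List Int), (∀ j ∈ js, 0 ≤ j ∧ j < m) →
    ∀ (s : List Bool) (st : List Int), (s.length : Int) = m → (∀ e ∈ st, 0 ≤ e ∧ e < m) →
    (js.foldl (scanStep x r k) (s, st)).1.length = s.length ∧
    (∀ j, 0 ≤ j → (sg (js.foldl (scanStep x r k) (s, st)).1 j = true ↔ sg s j = true ∨ (j ∈ js ∧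
        |PySem.List.pyGetD x k 0 - PySem.List.pyGetD x j 0| ≤ PySem.List.pyGetD r k 0))) ∧
    (∀ e, 0 ≤ e → (e ∈ (js.foldl (scanStep x r k) (s, st)).2 ↔ e ∈ st ∨ (sg s e = false ∧ e ∈ js ∧
        |PySem.List.pyGetD x k 0 - PySem.List.pyGetD x e 0| ≤ PySem.List.pyGetD r k 0))) ∧
    (∀ e ∈ (js.foldl (scanStep x r k) (s, st)).2, 0 ≤ e ∧ e < m) ∧
    ((∀ e ∈ st, sg s e = true) → st.Nodup → (js.foldl (scanStep x r k) (s, st)).2.Nodup) ∧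
    ((js.foldl (scanStep x r k) (s, st)).1.count true + st.length = s.count true +
        (js.foldl (scanStep x r k) (s, st)).2.length) := by
  intro js
  induction js with
  | nil => intro _ s st hs hst; exact ⟨rfl, by simp, by simp, hst, fun _ h => h, rfl⟩
  | cons j0 tl ih =>
    intro hjs s st hs hst
    have hj0 := hjs j0 (List.mem_cons_self)
    have htl : ∀ j ∈ tl, 0 ≤ j ∧ j < m := fun j hj => hjs j (List.mem_cons_of_mem _ hj)
    simp only [List.foldl_cons]
    by_cases hb : sg s j0 = true
    · have hstep : scanStep x r k (s, st) j0 = (s, st) := by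
        simp only [sg] at hb
        simp [scanStep, hb]
      rw [hstep]
      obtain ⟨ihl, ihsg, ihst, ihbd, ihnd, ihcnt⟩ := ih htl s st hs hst
      refine ⟨ihl, fun j hjn => ?_, fun e hen => ?_, ihbd, ihnd, ihcnt⟩
      · rw [ihsg j hjn]
        by_cases hj : j = j0
        · subst hj; simp [List.mem_cons]; tauto
        · simp [List.mem_cons, hj]
      · rw [ihst e hen]
        by_cases he : e = j0
        · subst he; simp [List.mem_cons, hb]
        · simp [List.mem_cons, he]
    · by_cases hc : |PySem.List.pyGetD x k 0 - PySem.List.pyGetD x j0 0| ≤ PySem.List.pyGetD r k 0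
      · have hstep : scanStep x r k (s, st) j0 = (PySem.List.pySetD s j0 true, st ++ [j0]) := by
          simp only [sg] at hb
          simp only [scanStep]
          rw [if_pos]
          simp only [Bool.and_eq_true, Bool.not_eq_true', decide_eq_true_eq]
          exact ⟨by simpa using hb, hc⟩
        rw [hstep]
        have hs1 : ((PySem.List.pySetD s j0 true).length : Int) = m := by
          rw [PySem.List.length_pySetD]; exact hs
        have hst1 : ∀ e ∈ st ++ [j0], 0 ≤ e ∧ e < m := by
          intro e he
          rcases List.mem_append.1 he with h | h
          · exact hst e h
          · simp only [List.mem_singleton] at h; subst h; exact hj0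
        have hsg' : ∀ j, 0 ≤ j → sg (PySem.List.pySetD s j0 true) j = if j = j0 then true else sg s j :=
          fun j hj => sg_pySetD s j0 hj0.1 (by omega) j hj
        obtain ⟨ihl, ihsg, ihst, ihbd, ihnd, ihcnt⟩ :=
          ih htl (PySem.List.pySetD s j0 true) (st ++ [j0]) hs1 hst1
        refine ⟨by rw [ihl, PySem.List.length_pySetD], fun j hjn => ?_, fun e hen => ?_, ihbd, ?_, ?_⟩
        · rw [ihsg j hjn, hsg' j hjn]
          by_cases hj : j = j0
          · subst hj; simp [List.mem_cons, hc]
          · simp [List.mem_cons, hj]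
        · rw [ihst e hen]
          simp only [List.mem_append, List.mem_singleton, List.mem_cons]
          by_cases he : e = j0
          · subst he; simp [hb, hc]
          · rw [hsg' e hen, if_neg he]
            simp only [he, false_or]
            tauto
        · intro hsst hnd
          refine ihnd ?_ ?_
          · intro e he
            rcases List.mem_append.1 he with h | h
            · rw [hsg' e (hst e h).1]
              split_ifs with hh
              · rfl
              · exact hsst e h
            · simp only [List.mem_singleton] at h; subst h
              rw [hsg' e hj0.1, if_pos rfl]
          · refine List.Nodup.append hnd (List.nodup_singleton j0) ?_
            simp only [List.disjoint_singleton]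
            intro hmem
            exact absurd (hsst j0 hmem) (by simpa using hb)
        · have hcs : (PySem.List.pySetD s j0 true).count true = s.count true + 1 :=
            count_sg_set s j0 hj0.1 (by omega) (by simpa using hb)
          simp only [List.length_append, List.length_singleton] at ihcnt
          omega
      · have hstep : scanStep x r k (s, st) j0 = (s, st) := by
          simp [scanStep, hc]
        rw [hstep]
        obtain ⟨ihl, ihsg, ihst, ihbd, ihnd, ihcnt⟩ := ih htl s st hs hst
        refine ⟨ihl, fun j hjn => ?_, fun e hen => ?_, ihbd, ihnd, ihcnt⟩
        · rw [ihsg j hjn]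
          by_cases hj : j = j0
          · subst hj; simp [List.mem_cons, hc]
          · simp [List.mem_cons, hj]
        · rw [ihst e hen]
          by_cases he : e = j0
          · subst he; simp [List.mem_cons, hc]
          · simp [List.mem_cons, he]

def BInv (m : Int) (x r : List Int) (i : Int) (seen : List Bool) (stack : List Int) : Prop :=
  (seen.length : Int) = m ∧
  (∀ k ∈ stack, 0 ≤ k ∧ k < m ∧ sg seen k = true) ∧
  stack.Nodup ∧
  (∀ j, 0 ≤ j → sg seen j = true → Reach m x r i j) ∧
  sg seen i = true ∧
  (∀ k, 0 ≤ k → sg seen k = true → k ∉ stack → ∀ j, ed m x r k j → sg seen j = true)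

theorem bBFS_correct (m : Int) (x r : List Int) (i : Int) (hi0 : 0 ≤ i ∧ i < m) :
    ∀ (fuel : Nat) (seen : List Bool) (stack : List Int),
    BInv m x r i seen stack →
    m.toNat - seen.count true + stack.length < fuel →
    ((bBFS fuel m x r seen stack).length : Int) = m ∧
    (∀ j, 0 ≤ j → ((sg (bBFS fuel m x r seen stack) j = true) ↔ Reach m x r i j)) := by
  intro fuel
  induction fuel with
  | zero => intro seen stack _ h; omega
  | succ fuel ih =>
    intro seen stack hInv hfuel
    obtain ⟨hlen, hstk, hnd, hsound, hi, hclosed⟩ := hInv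
    rcases List.eq_nil_or_concat stack with rfl | ⟨rest, k, rfl⟩
    · -- stack empty: BFS returns seen, which is closed
      have hpop : PySem.List.pop? ([] : List Int) (-1) = none := by decide
      rw [bBFS, hpop]
      refine ⟨hlen, fun j hj => ⟨hsound j hj, fun hr => ?_⟩⟩
      clear hj
      induction hr with
      | refl => exact hi
      | @tail b c hab he ihr =>
        have hb0 := (reach_bounds m x r i b hi0 hab).1
        exact hclosed b hb0 ihr (by simp) _ he
    · -- stack = rest ++ [k]
      simp only [List.concat_eq_append] at hstk hnd hclosed hfuel ⊢
      have hpop : PySem.List.pop? (rest ++ [k]) (-1) = some (k, rest) :=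
        PySem.List.pop?_last rest k
      rw [bBFS, hpop]
      have hk := hstk k (by simp)
      have hrest : ∀ e ∈ rest, 0 ≤ e ∧ e < m := fun e he =>
        ⟨(hstk e (by simp [he])).1, (hstk e (by simp [he])).2.1⟩
      have hscan := bScan_fold m x r k (PySem.List.pyRange 0 m 1)
        (fun j hj => PySem.List.mem_pyRange_one.1 hj)
        seen rest hlen hrest
      rw [← bScan_eq m x r k (seen, rest)] at hscan
      obtain ⟨hsl, hssg, hsst, hsbd, hsnd, hscnt⟩ := hscan
      set res := bScan m x r k (seen, rest) with hres
      have hndrest : rest.Nodup := (List.nodup_append.1 hnd).1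
      have hknotinrest : k ∉ rest := by
        have h := List.nodup_append.1 hnd
        exact fun hmem => h.2.2 k hmem k (by simp) rfl
      have hsgmono : ∀ j, 0 ≤ j → sg seen j = true → sg res.1 j = true := by
        intro j hj h
        exact (hssg j hj).2 (Or.inl h)
      refine ih res.1 res.2 ⟨by rw [hsl]; exact hlen, ?_, ?_, ?_, ?_, ?_⟩ ?_
      · -- stack elements bounded and seen
        intro e he
        rcases (hsst e (hsbd e he).1).1 he with h | h
        · exact ⟨(hrest e h).1, (hrest e h).2,
            hsgmono e (hrest e h).1 (hstk e (by simp [h])).2.2⟩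
        · refine ⟨(hsbd e he).1, (hsbd e he).2, ?_⟩
          exact (hssg e (hsbd e he).1).2 (Or.inr ⟨h.2.1, h.2.2⟩)
      · -- nodup
        exact hsnd (fun e he => (hstk e (by simp [he])).2.2) hndrest
      · -- soundness
        intro j hj hsg2
        rcases (hssg j hj).1 hsg2 with h | ⟨hmem, hcond⟩
        · exact hsound j hj h
        · rcases PySem.List.mem_pyRange_one.1 hmem with ⟨h0, h1⟩
          by_cases hjk : j = k
          · subst hjk; exact hsound j hj (hstk j (by simp)).2.2
          · exact (hsound k hk.1 hk.2.2).tail ⟨h0, h1, hjk, hcond⟩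
      · -- i still seen
        exact hsgmono i hi0.1 hi
      · -- processed vertices stay closed
        intro k2 hk2 hsgk2 hnotin j hedge
        by_cases hjk : k2 = k
        · subst hjk
          refine (hssg j hedge.1).2 (Or.inr ⟨?_, hedge.2.2.2⟩)
          exact PySem.List.mem_pyRange_one.2 ⟨hedge.1, hedge.2.1⟩
        · rcases Bool.eq_false_or_eq_true (sg seen k2) with hold | hold
          · -- k2 was already seen and not in rest (else it would be in res.2)
            have hnotrest : k2 ∉ rest := by
              intro hmem2
              exact hnotin ((hsst k2 hk2).2 (Or.inl hmem2))
            have hnotstack : k2 ∉ rest ++ [k] := by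
              simp only [List.mem_append, List.mem_singleton]
              rintro (h | h)
              · exact hnotrest h
              · exact hjk h
            exact hsgmono j hedge.1 (hclosed k2 hk2 hold hnotstack j hedge)
          · -- k2 newly seen: then k2 was pushed onto the stack, contradiction
            exfalso
            refine hnotin ((hsst k2 hk2).2 (Or.inr ⟨hold, ?_, ?_⟩))
            · by_contra hmemr
              rcases (hssg k2 hk2).1 hsgk2 with h | ⟨hmem2, hcond2⟩
              · rw [h] at hold; cases hold
              · exact hmemr hmem2
            · rcases (hssg k2 hk2).1 hsgk2 with h | ⟨hmem2, hcond2⟩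
              · rw [h] at hold; cases hold
              · exact hcond2
      · -- fuel bookkeeping
        have h1 : res.1.count true + rest.length = seen.count true + res.2.length := hscnt
        have h2 : res.1.count true ≤ res.1.length := List.count_le_length
        have h3 : seen.count true ≤ seen.length := List.count_le_length
        have h4 : res.1.length = seen.length := hsl
        have h5 : seen.length = m.toNat := by omega
        simp only [List.length_append, List.length_singleton] at hfuel
        omega

theorem sg_init (m i : Int) (j : Int) (hj : 0 ≤ j) (hi0 : 0 ≤ i ∧ i < m) :
    sg ((PySem.List.pyRange 0 m 1).map (fun j => j == i)) j = true ↔ j = i := by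
  by_cases hjm : j < m
  · rw [sg, PySem.List.pyGetD_map_pyRange_of_nonneg _ _ _ _ hj hjm]
    simp
  · rw [sg_nonneg _ _ hj]
    rw [List.getD, List.getElem?_eq_none, Option.getD_none]
    · simp; omega
    · rw [List.length_map, PySem.List.length_pyRange_one]; omega

theorem bClosure_correct (m : Int) (x r : List Int) (i : Int) (hi0 : 0 ≤ i ∧ i < m) :
    ((bClosure m x r i).length : Int) = m ∧
    (∀ j, 0 ≤ j → (sg (bClosure m x r i) j = true ↔ Reach m x r i j)) := by
  have hm : 0 < m := by omega
  have hsgi : sg ((PySem.List.pyRange 0 m 1).map (fun j => j == i)) i = true :=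
    (sg_init m i i hi0.1 hi0).2 rfl
  have hlen0 : (((PySem.List.pyRange 0 m 1).map (fun j => j == i)).length : Int) = m := by
    rw [List.length_map, PySem.List.length_pyRange_one]; omega
  refine bBFS_correct m x r i hi0 (m.toNat + 1)
    ((PySem.List.pyRange 0 m 1).map (fun j => j == i)) [i]
    ⟨hlen0, ?_, List.nodup_singleton i, ?_, hsgi, ?_⟩ ?_
  · intro k hk
    simp only [List.mem_singleton] at hk; subst hk
    exact ⟨hi0.1, hi0.2, hsgi⟩
  · intro j hj hsgj
    rw [sg_init m i j hj hi0] at hsgj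
    subst hsgj
    exact Relation.ReflTransGen.refl
  · intro k hk hsgk hknot
    exfalso
    rw [sg_init m i k hk hi0] at hsgk
    subst hsgk
    exact hknot (by simp)
  · have hcnt : 1 ≤ ((PySem.List.pyRange 0 m 1).map (fun j => j == i)).count true := by
      refine List.count_pos_iff.2 ?_
      refine List.mem_map.2 ⟨i, ?_, by simp⟩
      exact PySem.List.mem_pyRange_one.2 ⟨hi0.1, hi0.2⟩
    simp only [List.length_singleton]
    omega

theorem foldl_pyRemove_eq_erase : ∀ (vs : List Int) (l : List Int),
    List.foldl pyRemove l vs = List.foldl List.erase l vs := by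
  intro vs
  induction vs with
  | nil => intro l; rfl
  | cons v tl ih => intro l; simp only [List.foldl_cons, pyRemove_eq_erase, ih]

theorem foldl_erase_perm {vs vs' : List Int} (h : vs.Perm vs') :
    ∀ l, List.foldl List.erase l vs = List.foldl List.erase l vs' := by
  induction h with
  | nil => intro l; rfl
  | cons a _ ih => intro l; simp only [List.foldl_cons]; exact ih _
  | swap a b t => intro l; simp only [List.foldl_cons, List.erase_comm]
  | trans _ _ ih1 ih2 => intro l; rw [ih1, ih2]

theorem foldl_erase_length : ∀ (vs l : List Int), vs.Sublist l →
    (List.foldl List.erase l vs).length = l.length - vs.length := by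
  intro vs
  induction vs with
  | nil => intro l _; simp
  | cons v tl ih =>
    intro l hsub
    rcases List.cons_sublist_iff.1 hsub with ⟨r1, r2, rfl, hv, htl⟩
    have herase : (r1 ++ r2).erase v = r1.erase v ++ r2 := by
      rw [List.erase_append, if_pos hv]
    have hsub2 : tl.Sublist (r1.erase v ++ r2) :=
      htl.trans (List.sublist_append_right _ _)
    simp only [List.foldl_cons, herase]
    rw [ih _ hsub2]
    have hlen : (r1.erase v).length = r1.length - 1 := List.length_erase_of_mem hv
    have h1 : 1 ≤ r1.length := List.length_pos_of_mem hv
    have h2 : tl.length ≤ (r1.erase v ++ r2).length := hsub2.length_le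
    simp only [List.length_append, List.length_cons, hlen] at *
    omega

theorem map_pyGetD_sublist : ∀ (x : List Int) (idxs : List Int),
    idxs.Pairwise (· < ·) → (∀ j ∈ idxs, 0 ≤ j ∧ j < (x.length : Int)) →
    (idxs.map (fun j => PySem.List.pyGetD x j 0)).Sublist x := by
  intro x
  induction x with
  | nil =>
    intro idxs _ hb
    cases idxs with
    | nil => simp
    | cons j tl => exact absurd (hb j List.mem_cons_self) (by simp)
  | cons a x' ih =>
    intro idxs hp hb
    cases idxs with
    | nil => simp
    | cons j tl =>
      have hj := hb j List.mem_cons_self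
      have htlpos : ∀ e ∈ tl, 1 ≤ e := by
        intro e he
        have := (List.pairwise_cons.1 hp).1 e he
        omega
      have hshift : tl.map (fun e => PySem.List.pyGetD (a :: x') e 0)
          = (tl.map (· - 1)).map (fun e => PySem.List.pyGetD x' e 0) := by
        rw [List.map_map]
        refine List.map_congr_left ?_
        intro e he
        have h1 := htlpos e he
        show PySem.List.pyGetD (a :: x') e 0 = PySem.List.pyGetD x' (e - 1) 0
        obtain ⟨nn, hn⟩ : ∃ nn : Nat, e = (nn : Int) + 1 := ⟨(e - 1).toNat, by omega⟩
        rw [hn]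
        simp only [PySem.List.pyGetD, add_sub_cancel_right]
        rw [PySem.List.pyGet?_cons_succ]
      have htl' : (tl.map (· - 1)).Pairwise (· < ·) := by
        refine (List.pairwise_cons.1 hp).2.map _ ?_
        intro p q hpq
        omega
      have hbtl' : ∀ e ∈ tl.map (· - 1), 0 ≤ e ∧ e < (x'.length : Int) := by
        intro e he
        rcases List.mem_map.1 he with ⟨e0, he0, rfl⟩
        have h1 := htlpos e0 he0
        have h2 := hb e0 (List.mem_cons_of_mem _ he0)
        simp only [List.length_cons] at h2
        constructor <;> [omega; (push_cast; omega)]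
      by_cases hj0 : j = 0
      · subst hj0
        simp only [List.map_cons]
        have hhd : PySem.List.pyGetD (a :: x') 0 0 = a := by
          simp [PySem.List.pyGetD, PySem.List.pyGet?_zero_cons]
        rw [hhd, hshift]
        exact List.Sublist.cons₂ a (ih _ htl' hbtl')
      · -- all indices ≥ 1: whole map is a sublist of x'
        have hall : ∀ e ∈ j :: tl, 1 ≤ e := by
          intro e he
          rcases List.mem_cons.1 he with rfl | he'
          · omega
          · exact htlpos e he'
        have hshift2 : (j :: tl).map (fun e => PySem.List.pyGetD (a :: x') e 0)
            = ((j :: tl).map (· - 1)).map (fun e => PySem.List.pyGetD x' e 0) := by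
          rw [List.map_map]
          refine List.map_congr_left ?_
          intro e he
          have h1 := hall e he
          show PySem.List.pyGetD (a :: x') e 0 = PySem.List.pyGetD x' (e - 1) 0
          obtain ⟨nn, hn⟩ : ∃ nn : Nat, e = (nn : Int) + 1 := ⟨(e - 1).toNat, by omega⟩
          rw [hn]
          simp only [PySem.List.pyGetD, add_sub_cancel_right]
          rw [PySem.List.pyGet?_cons_succ]
        have hp' : ((j :: tl).map (· - 1)).Pairwise (· < ·) := by
          refine hp.map _ ?_
          intro p q hpq
          omega
        have hb' : ∀ e ∈ (j :: tl).map (· - 1), 0 ≤ e ∧ e < (x'.length : Int) := by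
          intro e he
          rcases List.mem_map.1 he with ⟨e0, he0, rfl⟩
          have h1 := hall e0 he0
          have h2 := hb e0 he0
          simp only [List.length_cons] at h2
          constructor <;> [omega; (push_cast; omega)]
        rw [hshift2]
        exact (ih _ hp' hb').cons a

theorem countP_sg (s : List Bool) :
    ((PySem.List.pyRange 0 (s.length : Int) 1).countP (fun j => sg s j)) = s.count true := by
  induction s using List.reverseRecOn with
  | nil => simp [PySem.List.pyRange_one_eq_nil]
  | append_singleton s0 b ih =>
    have hsplit : PySem.List.pyRange 0 (((s0 ++ [b]).length : Nat) : Int) 1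
        = PySem.List.pyRange 0 (s0.length : Int) 1 ++ [(s0.length : Int)] := by
      have h1 : (((s0 ++ [b]).length : Nat) : Int) = (s0.length : Int) + 1 := by
        simp [List.length_append]
      rw [h1, PySem.List.pyRange_one_succ_right (by positivity)]
    rw [hsplit, List.countP_append]
    have hcong : (PySem.List.pyRange 0 (s0.length : Int) 1).countP (fun j => sg (s0 ++ [b]) j)
        = (PySem.List.pyRange 0 (s0.length : Int) 1).countP (fun j => sg s0 j) := by
      refine List.countP_congr ?_
      intro j hj
      rcases PySem.List.mem_pyRange_one.1 hj with ⟨h0, h1⟩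
      rw [sg_nonneg _ _ h0, sg_nonneg _ _ h0, List.getD, List.getD,
        List.getElem?_append_left (by omega)]
    have hlast : sg (s0 ++ [b]) (s0.length : Int) = b := by
      rw [sg_nonneg _ _ (by positivity), List.getD]
      simp [List.getElem?_append_right (le_refl s0.length)]
    rw [hcong, List.countP_singleton, hlast, ih, List.count_append]
    cases b <;> simp [List.count_cons]

def Lfs (n : Int) (x r : List Int) (i : Int) : List Int := fsRec (n.toNat + 1) n x r [i]

theorem Lfs_correct (n : Int) (x r : List Int) (i : Int) (hi0 : 0 ≤ i ∧ i < n) :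
    (Lfs n x r i).Nodup ∧ (∀ j, j ∈ Lfs n x r i ↔ Reach n x r i j) := by
  refine fsRec_correct n x r i hi0 (n.toNat + 1) [i] (List.nodup_singleton i) ?_ (by simp) ?_
  · intro e he
    simp only [List.mem_singleton] at he; subst he
    exact ⟨hi0.1, hi0.2, Relation.ReflTransGen.refl⟩
  · simp

theorem Lfs_perm (n : Int) (x r : List Int) (i : Int) (hi0 : 0 ≤ i ∧ i < n) :
    (Lfs n x r i).Perm
      ((PySem.List.pyRange 0 n 1).filter (fun j => sg (bClosure n x r i) j)) := by
  obtain ⟨hnd, hmem⟩ := Lfs_correct n x r i hi0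
  obtain ⟨hlen, hsg⟩ := bClosure_correct n x r i hi0
  refine (List.perm_ext_iff_of_nodup hnd ((PySem.List.nodup_pyRange_one 0 n).filter _)).2 ?_
  intro a
  rw [hmem a, List.mem_filter]
  constructor
  · intro hr
    have hb := reach_bounds n x r i a hi0 hr
    exact ⟨PySem.List.mem_pyRange_one.2 hb, (hsg a hb.1).2 hr⟩
  · rintro ⟨hmemr, hsga⟩
    rcases PySem.List.mem_pyRange_one.1 hmemr with ⟨h0, h1⟩
    exact (hsg a h0).1 hsga

theorem Lfs_length (n : Int) (x r : List Int) (i : Int) (hi0 : 0 ≤ i ∧ i < n) :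
    (Lfs n x r i).length = (bClosure n x r i).count true := by
  rw [(Lfs_perm n x r i hi0).length_eq]
  obtain ⟨hlen, _⟩ := bClosure_correct n x r i hi0
  rw [← List.countP_eq_length_filter]
  have h2 := countP_sg (bClosure n x r i)
  rw [hlen] at h2
  exact h2

theorem Lfs_pos (n : Int) (x r : List Int) (i : Int) (hi0 : 0 ≤ i ∧ i < n) :
    1 ≤ (Lfs n x r i).length := by
  have h := (Lfs_correct n x r i hi0).2 i
  have : i ∈ Lfs n x r i := h.2 Relation.ReflTransGen.refl
  exact List.length_pos_of_mem this

def emA (n : Int) (x r : List Int) : List (List Int) :=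
  (PySem.List.pyRange 0 n 1).map (fun i => fsRec (n.toNat + 1) n x r [i])

def astep (n : Int) (x r : List Int) : Int → Int → Int := fun best i =>
  if (PySem.List.pyGetD (emA n x r) i []).length
      > (PySem.List.pyGetD (emA n x r) best []).length then i else best

def bestIdx (n : Int) (x r : List Int) : Int :=
  (PySem.List.pyRange 0 n 1).foldl (astep n x r) 0

theorem emA_get (n : Int) (x r : List Int) (i : Int) (h0 : 0 ≤ i) (h1 : i < n) :
    PySem.List.pyGetD (emA n x r) i [] = Lfs n x r i := by
  rw [emA, PySem.List.pyGetD_map_pyRange_of_nonneg _ _ _ _ h0 h1]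
  rfl

theorem argmax_fold (n : Int) (x r : List Int) :
    ∀ (js : List Int), (∀ j ∈ js, 0 ≤ j ∧ j < n) →
    ∀ b, 0 ≤ b → b < n →
    (0 ≤ js.foldl (astep n x r) b ∧ js.foldl (astep n x r) b < n) ∧
    js.foldl (fun (bst : List Bool × Int) i =>
        let seen := bClosure n x r i
        let cnt : Int := (seen.count true : Nat)
        if cnt > bst.2 then (seen, cnt) else bst)
      (bClosure n x r b, ((bClosure n x r b).count true : Nat))
      = (bClosure n x r (js.foldl (astep n x r) b),
         (((bClosure n x r (js.foldl (astep n x r) b)).count true : Nat) : Int)) := by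
  intro js
  induction js with
  | nil => intro _ b hb0 hb1; exact ⟨⟨hb0, hb1⟩, rfl⟩
  | cons i0 tl ih =>
    intro hjs b hb0 hb1
    have hi0 := hjs i0 List.mem_cons_self
    have htl : ∀ j ∈ tl, 0 ≤ j ∧ j < n := fun j hj => hjs j (List.mem_cons_of_mem _ hj)
    simp only [List.foldl_cons]
    have hstepA : astep n x r b i0 = if (Lfs n x r i0).length > (Lfs n x r b).length
        then i0 else b := by
      rw [astep]
      rw [emA_get n x r i0 hi0.1 hi0.2, emA_get n x r b hb0 hb1]
    have hcnt : ∀ j, 0 ≤ j → j < n →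
        (((bClosure n x r j).count true : Nat) : Int) = ((Lfs n x r j).length : Int) := by
      intro j h0 h1
      rw [Lfs_length n x r j ⟨h0, h1⟩]
    have hstepB : (if (((bClosure n x r i0).count true : Nat) : Int)
          > (((bClosure n x r b).count true : Nat) : Int)
        then (bClosure n x r i0, (((bClosure n x r i0).count true : Nat) : Int))
        else (bClosure n x r b, (((bClosure n x r b).count true : Nat) : Int)))
        = (bClosure n x r (astep n x r b i0),
           (((bClosure n x r (astep n x r b i0)).count true : Nat) : Int)) := by
      rw [hstepA]
      rw [hcnt i0 hi0.1 hi0.2, hcnt b hb0 hb1]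
      by_cases hgt : (Lfs n x r b).length < (Lfs n x r i0).length
      · rw [if_pos (by exact_mod_cast hgt), if_pos hgt, hcnt i0 hi0.1 hi0.2]
      · rw [if_neg (by exact_mod_cast hgt), if_neg hgt, hcnt b hb0 hb1]
    have hbounds : 0 ≤ astep n x r b i0 ∧ astep n x r b i0 < n := by
      rw [hstepA]
      split_ifs
      · exact hi0
      · exact ⟨hb0, hb1⟩
    have := ih htl (astep n x r b i0) hbounds.1 hbounds.2
    refine ⟨this.1, ?_⟩
    show (tl.foldl _ (if (((bClosure n x r i0).count true : Nat) : Int)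
          > (((bClosure n x r b).count true : Nat) : Int)
        then (bClosure n x r i0, (((bClosure n x r i0).count true : Nat) : Int))
        else (bClosure n x r b, (((bClosure n x r b).count true : Nat) : Int)))) = _
    rw [hstepB]
    exact this.2

theorem bBest_eq (n : Int) (x r : List Int) (hn : 0 < n) :
    (0 ≤ bestIdx n x r ∧ bestIdx n x r < n) ∧
    bBest n x r = (bClosure n x r (bestIdx n x r),
      (((bClosure n x r (bestIdx n x r)).count true : Nat) : Int)) := by
  have hcons : PySem.List.pyRange 0 n 1 = 0 :: PySem.List.pyRange 1 n 1 :=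
    PySem.List.pyRange_one_cons hn
  have hjs : ∀ j ∈ PySem.List.pyRange 1 n 1, 0 ≤ j ∧ j < n := by
    intro j hj
    rcases PySem.List.mem_pyRange_one.1 hj with ⟨h1, h2⟩
    exact ⟨by omega, h2⟩
  have hfirstA : astep n x r 0 0 = 0 := by
    rw [astep, emA_get n x r 0 le_rfl hn]
    simp
  have hcnt0 : (((bClosure n x r 0).count true : Nat) : Int) = ((Lfs n x r 0).length : Int) := by
    rw [Lfs_length n x r 0 ⟨le_rfl, hn⟩]
  have hpos : (0 : Int) < ((Lfs n x r 0).length : Int) := by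
    exact_mod_cast Lfs_pos n x r 0 ⟨le_rfl, hn⟩
  have harg := argmax_fold n x r (PySem.List.pyRange 1 n 1) hjs 0 le_rfl hn
  constructor
  · rw [bestIdx, hcons, List.foldl_cons, hfirstA]
    exact harg.1
  · rw [bBest, bestIdx, hcons, List.foldl_cons, List.foldl_cons, hfirstA]
    have hfirstB : (if (((bClosure n x r 0).count true : Nat) : Int) > (0 : Int)
        then (bClosure n x r 0, (((bClosure n x r 0).count true : Nat) : Int))
        else (([] : List Bool), (0 : Int)))
        = (bClosure n x r 0, (((bClosure n x r 0).count true : Nat) : Int)) := by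
      rw [if_pos (by rw [hcnt0]; exact hpos)]
    show (PySem.List.pyRange 1 n 1).foldl _ (if (((bClosure n x r 0).count true : Nat) : Int) > (0 : Int)
        then (bClosure n x r 0, (((bClosure n x r 0).count true : Nat) : Int))
        else (([] : List Bool), (0 : Int))) = _
    rw [hfirstB]
    exact harg.2

theorem remove_fold_split (x r : List Int) : ∀ (S : List Int) (a : Int) (b c : List Int),
    S.foldl (fun (st : Int × List Int × List Int) exp =>
      (st.1 - 1, pyRemove st.2.1 (PySem.List.pyGetD x exp 0),
                 pyRemove st.2.2 (PySem.List.pyGetD r exp 0))) (a, b, c)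
    = (a - (S.length : Int),
       List.foldl pyRemove b (S.map (fun e => PySem.List.pyGetD x e 0)),
       List.foldl pyRemove c (S.map (fun e => PySem.List.pyGetD r e 0))) := by
  intro S
  induction S with
  | nil => intro a b c; simp
  | cons e tl ih =>
    intro a b c
    simp only [List.foldl_cons, List.map_cons]
    rw [ih]
    congr 1
    simp only [List.length_cons]
    push_cast
    ring

theorem bLoop_acc : ∀ (fuel : Nat) (m : Int) (x r : List Int) (acc : Int),
    bLoop fuel m x r acc = acc + bLoop fuel m x r 0 := by
  intro fuel
  induction fuel with
  | zero => intro m x r acc; simp [bLoop]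
  | succ fuel ih =>
    intro m x r acc
    rw [bLoop, bLoop]
    by_cases hm : m > 0
    · simp only [if_pos hm]
      rw [ih _ _ _ (acc + 1), ih _ _ _ (0 + 1)]
      ring
    · simp only [if_neg hm]
      ring

def stA (n : Int) (x r : List Int) : Int × List Int × List Int :=
  (PySem.List.pyGetD (emA n x r) (bestIdx n x r) []).foldl
    (fun (st : Int × List Int × List Int) exp =>
      (st.1 - 1, pyRemove st.2.1 (PySem.List.pyGetD x exp 0),
                 pyRemove st.2.2 (PySem.List.pyGetD r exp 0)))
    (n, x, r)

theorem calcA_succ (fa : Nat) (n : Int) (x r : List Int) (h0 : ¬ n = 0) :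
    calcA (fa + 1) n x r = 1 + calcA fa (stA n x r).1 (stA n x r).2.1 (stA n x r).2.2 := by
  rw [calcA, if_neg h0]
  rfl

def idxsB (n : Int) (x r : List Int) : List Int :=
  (PySem.List.pyRange 0 n 1).filter (fun j => PySem.List.pyGetD (bBest n x r).1 j false)

theorem bLoop_succ (fb : Nat) (n : Int) (x r : List Int) (acc : Int) (hm : n > 0) :
    bLoop (fb + 1) n x r acc = bLoop fb (n - (bBest n x r).2)
      (List.foldl pyRemove x ((idxsB n x r).map (fun j => PySem.List.pyGetD x j 0)))
      (List.foldl pyRemove r ((idxsB n x r).map (fun j => PySem.List.pyGetD r j 0)))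
      (acc + 1) := by
  rw [bLoop, if_pos hm]
  rfl

theorem stA_eq (n : Int) (x r : List Int)
    (hb : 0 ≤ bestIdx n x r ∧ bestIdx n x r < n) :
    stA n x r = (n - ((Lfs n x r (bestIdx n x r)).length : Int),
      List.foldl pyRemove x ((Lfs n x r (bestIdx n x r)).map (fun e => PySem.List.pyGetD x e 0)),
      List.foldl pyRemove r ((Lfs n x r (bestIdx n x r)).map (fun e => PySem.List.pyGetD r e 0))) := by
  rw [stA, emA_get n x r _ hb.1 hb.2, remove_fold_split]

theorem main_equal : ∀ (k : Nat) (n : Int) (x r : List Int), n.toNat ≤ k →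
    0 ≤ n → n ≤ (x.length : Int) → n ≤ (r.length : Int) →
    ∀ (fA fB : Nat), n.toNat + 1 ≤ fA → n.toNat + 1 ≤ fB →
    calcA fA n x r = bLoop fB n x r 0 := by
  intro k
  induction k with
  | zero =>
    intro n x r hk h0 hx hr fA fB hfA hfB
    have hn0 : n = 0 := by omega
    subst hn0
    obtain ⟨fa, rfl⟩ : ∃ fa, fA = fa + 1 := ⟨fA - 1, by omega⟩
    obtain ⟨fb, rfl⟩ : ∃ fb, fB = fb + 1 := ⟨fB - 1, by omega⟩
    rw [calcA, if_pos rfl, bLoop, if_neg (by omega)]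
  | succ k ih =>
    intro n x r hk h0 hx hr fA fB hfA hfB
    by_cases hn0 : n = 0
    · subst hn0
      obtain ⟨fa, rfl⟩ : ∃ fa, fA = fa + 1 := ⟨fA - 1, by omega⟩
      obtain ⟨fb, rfl⟩ : ∃ fb, fB = fb + 1 := ⟨fB - 1, by omega⟩
      rw [calcA, if_pos rfl, bLoop, if_neg (by omega)]
    · have hn : 0 < n := by omega
      obtain ⟨fa, rfl⟩ : ∃ fa, fA = fa + 1 := ⟨fA - 1, by omega⟩
      obtain ⟨fb, rfl⟩ : ∃ fb, fB = fb + 1 := ⟨fB - 1, by omega⟩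
      obtain ⟨hbb, hbst⟩ := bBest_eq n x r hn
      set bb := bestIdx n x r with hbbdef
      -- the closure list of the best index
      have hL := Lfs_correct n x r bb hbb
      have hLlen : (Lfs n x r bb).length = (bClosure n x r bb).count true :=
        Lfs_length n x r bb hbb
      have hLperm : (Lfs n x r bb).Perm
          ((PySem.List.pyRange 0 n 1).filter (fun j => sg (bClosure n x r bb) j)) :=
        Lfs_perm n x r bb hbb
      -- B's filtered index list equals the filter over the best mask
      have hidxs : idxsB n x r
          = (PySem.List.pyRange 0 n 1).filter (fun j => sg (bClosure n x r bb) j) := by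
        rw [idxsB, hbst]
        rfl
      have hidxperm : (Lfs n x r bb).Perm (idxsB n x r) := by
        rw [hidxs]; exact hLperm
      -- removal folds agree
      have hfoldx : List.foldl pyRemove x ((Lfs n x r bb).map (fun e => PySem.List.pyGetD x e 0))
          = List.foldl pyRemove x ((idxsB n x r).map (fun j => PySem.List.pyGetD x j 0)) := by
        rw [foldl_pyRemove_eq_erase, foldl_pyRemove_eq_erase]
        exact foldl_erase_perm (hidxperm.map _) x
      have hfoldr : List.foldl pyRemove r ((Lfs n x r bb).map (fun e => PySem.List.pyGetD r e 0))
          = List.foldl pyRemove r ((idxsB n x r).map (fun j => PySem.List.pyGetD r j 0)) := by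
        rw [foldl_pyRemove_eq_erase, foldl_pyRemove_eq_erase]
        exact foldl_erase_perm (hidxperm.map _) r
      -- index list properties for the length computation
      have hidxsub : (idxsB n x r).Sublist (PySem.List.pyRange 0 n 1) := by
        rw [idxsB]; exact List.filter_sublist
      have hidxpw : (idxsB n x r).Pairwise (· < ·) :=
        List.Pairwise.sublist hidxsub (PySem.List.pairwise_lt_pyRange_one 0 n)
      have hidxbd : ∀ j ∈ idxsB n x r, 0 ≤ j ∧ j < n := by
        intro j hj
        exact PySem.List.mem_pyRange_one.1 (hidxsub.mem hj)
      have hidxlen : (idxsB n x r).length = (Lfs n x r bb).length := hidxperm.length_eq.symm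
      -- new x and r lengths
      have hsubx : ((idxsB n x r).map (fun j => PySem.List.pyGetD x j 0)).Sublist x := by
        refine map_pyGetD_sublist x (idxsB n x r) hidxpw ?_
        intro j hj
        exact ⟨(hidxbd j hj).1, by have := (hidxbd j hj).2; omega⟩
      have hsubr : ((idxsB n x r).map (fun j => PySem.List.pyGetD r j 0)).Sublist r := by
        refine map_pyGetD_sublist r (idxsB n x r) hidxpw ?_
        intro j hj
        exact ⟨(hidxbd j hj).1, by have := (hidxbd j hj).2; omega⟩
      have hlenx : (List.foldl List.erase x ((idxsB n x r).map (fun j => PySem.List.pyGetD x j 0))).length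
          = x.length - (idxsB n x r).length := by
        rw [foldl_erase_length _ _ hsubx, List.length_map]
      have hlenr : (List.foldl List.erase r ((idxsB n x r).map (fun j => PySem.List.pyGetD r j 0))).length
          = r.length - (idxsB n x r).length := by
        rw [foldl_erase_length _ _ hsubr, List.length_map]
      -- closure size bounds
      have hLle : (Lfs n x r bb).length ≤ n.toNat := by
        have hsub : Lfs n x r bb ⊆ PySem.List.pyRange 0 n 1 := by
          intro e he
          have hb := reach_bounds n x r bb e hbb ((hL.2 e).1 he)
          exact PySem.List.mem_pyRange_one.2 hb
        have h2 := (hL.1.subperm hsub).length_le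
        rw [PySem.List.length_pyRange_one] at h2
        omega
      have hLpos := Lfs_pos n x r bb hbb
      -- one round on each side
      rw [calcA_succ fa n x r hn0, stA_eq n x r hbb, ← hbbdef]
      rw [bLoop_succ fb n x r 0 hn]
      rw [bLoop_acc fb]
      have hcnt2 : (bBest n x r).2 = ((Lfs n x r bb).length : Int) := by
        rw [hbst, hLlen]
      rw [hcnt2, hfoldx, hfoldr]
      congr 1
      -- apply the induction hypothesis to the new state
      set n' := n - ((Lfs n x r bb).length : Int) with hn'
      have hsubxle := hsubx.length_le
      have hsubrle := hsubr.length_le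
      have hlm : (idxsB n x r).length = (Lfs n x r bb).length := hidxlen
      refine ih n' _ _ (by omega) (by omega) ?_ ?_ fa fb (by omega) (by omega)
      · rw [foldl_pyRemove_eq_erase ((idxsB n x r).map (fun j => PySem.List.pyGetD x j 0)) x,
          hlenx]
        simp only [List.length_map] at hsubxle
        push_cast
        omega
      · rw [foldl_pyRemove_eq_erase ((idxsB n x r).map (fun j => PySem.List.pyGetD r j 0)) r,
          hlenr]
        simp only [List.length_map] at hsubrle
        push_cast
        omega

-- ===== VERDICT (by name: the statement is the Claim_ definition above) =====
theorem calc_py_spec : Claim_equal_calc_py := by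
  intro n x r _ hpre
  unfold Spec_calc_py calc_py calc_py_alt
  exact main_equal n.toNat n x r le_rfl hpre.1 hpre.2.1 hpre.2.2 _ _ le_rfl le_rfl
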